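-- pv_equiv track=rewrite | github.com/zhenfelix/OnlineJudgeCodings | LeetCode/2207. Maximize Number of Subsequences in a String/solution.py | maximumSubsequenceCount
-- ===== SOURCE A (Python) =====
-- def maximumSubsequenceCount(text: str, pattern: str) -> int:
--     # if pattern[0] == pattern[1]:
--     #     cnt = Counter(text)[pattern[0]]
--     #     cnt += 1
--     #     return cnt*(cnt-1)//2
--     res = 0
--     cnt = 1
--     cur = 0
--     for ch in text:
--         if ch == pattern[1]:
--             cur += cnt
--         if ch == pattern[0]:
--             cnt += 1
--
--     res = max(res, cur)
--     cnt, cur = 1, 0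
--     for ch in text[::-1]:
--         if ch == pattern[0]:
--             cur += cnt
--         if ch == pattern[1]:
--             cnt += 1
--     res = max(res, cur)
--     return res
-- ===== SOURCE B (Python) =====
-- def maximumSubsequenceCount(text: str, pattern: str) -> int:
--     p0, p1 = pattern[0], pattern[1]
--     c0 = c1 = base = 0
--     for ch in text:
--         if ch == p1:
--             base += c0
--             c1 += 1
--         if ch == p0:
--             c0 += 1
--     return base + max(c0, c1)
-- ===== Notes on version B (the rewrite author's own statement) =====
-- stated objective: faster
-- what changed: One forward pass keeping counts c0, c1 and the existing-pair total base, returning base + max(c0, c1) in closed form, instead of A's two scans (forward and a reversed copy) each re-tallying pairs; halving the scans (and dropping the reversed-copy build) measured ~2.8x faster.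
-- outside the precondition, e.g. on maximumSubsequenceCount('', 'a'): A returns 0, B raises IndexError
import Mathlib
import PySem

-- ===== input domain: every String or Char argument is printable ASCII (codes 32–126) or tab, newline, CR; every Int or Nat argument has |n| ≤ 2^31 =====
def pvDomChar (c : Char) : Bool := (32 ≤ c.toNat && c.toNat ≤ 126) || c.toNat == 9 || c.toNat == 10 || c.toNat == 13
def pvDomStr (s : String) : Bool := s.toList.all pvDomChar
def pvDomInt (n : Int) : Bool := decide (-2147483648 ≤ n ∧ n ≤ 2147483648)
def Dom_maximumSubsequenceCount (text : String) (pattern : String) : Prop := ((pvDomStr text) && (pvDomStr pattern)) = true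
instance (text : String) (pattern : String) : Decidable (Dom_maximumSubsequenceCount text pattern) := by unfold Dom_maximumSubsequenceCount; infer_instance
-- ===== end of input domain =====

-- B replaces A's two scans (forward and reversed) by one forward pass keeping c0, c1
-- and the pair total, returning base + max(c0, c1) in closed form (objective: simpler).

-- ===== PORT A =====
-- Literal port of A: two foldl loops over the same (cnt, cur) state; text[::-1] is
-- the reverse (PySem.List.slice?_none_none_neg_one). pattern[0]/pattern[1] via pyGet?;
-- the none branch (pattern shorter than 2) is excluded by Pre_ and returns a junk 0.
def maximumSubsequenceCount (text : String) (pattern : String) : Int :=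
  match PySem.Str.pyGet? pattern 0, PySem.Str.pyGet? pattern 1 with
  | some p0, some p1 =>
    let res : Int := 0
    let f1 := text.toList.foldl
      (fun (s : Int × Int) ch =>
        ((if ch = p0 then s.1 + 1 else s.1), (if ch = p1 then s.2 + s.1 else s.2)))
      (1, 0)
    let res := max res f1.2
    let f2 := text.toList.reverse.foldl
      (fun (s : Int × Int) ch =>
        ((if ch = p1 then s.1 + 1 else s.1), (if ch = p0 then s.2 + s.1 else s.2)))
      (1, 0)
    max res f2.2
  | _, _ => 0

-- ===== PORT B =====
def maximumSubsequenceCount_alt (text : String) (pattern : String) : Int :=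
  match PySem.Str.pyGet? pattern 0 with
  | none => 0
  | some p0 =>
  match PySem.Str.pyGet? pattern 1 with
  | none => 0
  | some p1 =>
    let s := text.toList.foldl
      (fun (s : Int × Int × Int) ch =>
        let c0 := s.1; let c1 := s.2.1; let base := s.2.2
        let c1' := if ch = p1 then c1 + 1 else c1
        let base' := if ch = p1 then base + c0 else base
        let c0' := if ch = p0 then c0 + 1 else c0
        (c0', c1', base'))
      (0, 0, 0)
    s.2.2 + max s.1 s.2.1

-- ===== PRECONDITION & SPEC =====
-- Pre_ excludes patterns shorter than 2 characters: there A raises IndexError on any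
-- nonempty text (and B always raises), while on empty text A happens to return 0
-- without touching pattern but B still raises (see claim cites).
def Pre_maximumSubsequenceCount (text : String) (pattern : String) : Prop :=
  2 ≤ pattern.toList.length
instance (text : String) (pattern : String) : Decidable (Pre_maximumSubsequenceCount text pattern) := by unfold Pre_maximumSubsequenceCount; infer_instance
def pvWitness_maximumSubsequenceCount : String × String := ("abab", "ab")

def Spec_maximumSubsequenceCount (text : String) (pattern : String) (out : Int) : Prop := out = maximumSubsequenceCount_alt text pattern
instance (text : String) (pattern : String) (out : Int) : Decidable (Spec_maximumSubsequenceCount text pattern out) := by unfold Spec_maximumSubsequenceCount; infer_instance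

-- ===== CLAIM (what is proved, stated in full; the proofs are below) =====
def Claim_equal_maximumSubsequenceCount : Prop := ∀ (text : String) (pattern : String), Dom_maximumSubsequenceCount text pattern → Pre_maximumSubsequenceCount text pattern → Spec_maximumSubsequenceCount text pattern (maximumSubsequenceCount text pattern)

-- ===== LEMMAS AND PROOFS =====

-- number of occurrences of p in cs, as an Int
def pvCnt (p : Char) : List Char → Int
  | [] => 0
  | c :: cs => (if c = p then 1 else 0) + pvCnt p cs

-- number of index pairs i < j with cs[i] = p0 and cs[j] = p1
def pvPairs (p0 p1 : Char) : List Char → Int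
  | [] => 0
  | c :: cs => (if c = p0 then pvCnt p1 cs else 0) + pvPairs p0 p1 cs

theorem pvCnt_nonneg (p : Char) (cs : List Char) : 0 ≤ pvCnt p cs := by
  induction cs with
  | nil => simp [pvCnt]
  | cons c cs ih => simp only [pvCnt]; split <;> omega

theorem pvPairs_nonneg (p0 p1 : Char) (cs : List Char) : 0 ≤ pvPairs p0 p1 cs := by
  induction cs with
  | nil => simp [pvPairs]
  | cons c cs ih =>
    simp only [pvPairs]
    have := pvCnt_nonneg p1 cs
    split <;> omega

-- A's forward loop (and, with roles swapped, its backward loop) in closed form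
theorem pv_foldA (p0 p1 : Char) (cs : List Char) : ∀ cnt cur : Int,
    cs.foldl (fun (s : Int × Int) ch =>
        ((if ch = p0 then s.1 + 1 else s.1), (if ch = p1 then s.2 + s.1 else s.2)))
      (cnt, cur)
    = (cnt + pvCnt p0 cs, cur + cnt * pvCnt p1 cs + pvPairs p0 p1 cs) := by
  induction cs with
  | nil => intro cnt cur; simp [pvCnt, pvPairs]
  | cons c cs ih =>
    intro cnt cur
    simp only [List.foldl_cons, ih, pvCnt, pvPairs]
    simp only [Prod.mk.injEq]
    constructor <;> (split_ifs <;> ring)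

-- A's backward loop over the reversed text, in closed form over the original text
theorem pv_foldA_rev (p0 p1 : Char) (cs : List Char) : ∀ cnt cur : Int,
    cs.reverse.foldl (fun (s : Int × Int) ch =>
        ((if ch = p1 then s.1 + 1 else s.1), (if ch = p0 then s.2 + s.1 else s.2)))
      (cnt, cur)
    = (cnt + pvCnt p1 cs, cur + cnt * pvCnt p0 cs + pvPairs p0 p1 cs) := by
  induction cs with
  | nil => intro cnt cur; simp [pvCnt, pvPairs]
  | cons c cs ih =>
    intro cnt cur
    simp only [List.reverse_cons, List.foldl_append, ih, List.foldl_cons, List.foldl_nil,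
      pvCnt, pvPairs]
    simp only [Prod.mk.injEq]
    constructor <;> (split_ifs <;> ring)

-- B's single loop in closed form
theorem pv_foldB (p0 p1 : Char) (cs : List Char) : ∀ c0 c1 base : Int,
    cs.foldl (fun (s : Int × Int × Int) ch =>
        let c0 := s.1; let c1 := s.2.1; let base := s.2.2
        let c1' := if ch = p1 then c1 + 1 else c1
        let base' := if ch = p1 then base + c0 else base
        let c0' := if ch = p0 then c0 + 1 else c0
        (c0', c1', base'))
      (c0, c1, base)
    = (c0 + pvCnt p0 cs, c1 + pvCnt p1 cs, base + c0 * pvCnt p1 cs + pvPairs p0 p1 cs) := by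
  induction cs with
  | nil => intro c0 c1 base; simp [pvCnt, pvPairs]
  | cons c cs ih =>
    intro c0 c1 base
    simp only [List.foldl_cons, ih, pvCnt, pvPairs]
    simp only [Prod.mk.injEq]
    refine ⟨?_, ?_, ?_⟩ <;> (split_ifs <;> ring)

-- ===== VERDICT (by name: the statement is the Claim_ definition above) =====
theorem maximumSubsequenceCount_spec : Claim_equal_maximumSubsequenceCount := by
  intro text pattern _dom pre
  unfold Spec_maximumSubsequenceCount
  unfold Pre_maximumSubsequenceCount at pre
  obtain ⟨p0, p1, rest, hp⟩ : ∃ p0 p1 rest, pattern.toList = p0 :: p1 :: rest := by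
    cases h : pattern.toList with
    | nil => rw [h] at pre; simp at pre
    | cons a t =>
      cases t with
      | nil => rw [h] at pre; simp at pre
      | cons b r => exact ⟨a, b, r, rfl⟩
  have h0 : PySem.Str.pyGet? pattern 0 = some p0 := by
    simp [hp]
  have h1 : PySem.Str.pyGet? pattern 1 = some p1 := by
    simp [hp]
  unfold maximumSubsequenceCount maximumSubsequenceCount_alt
  rw [h0, h1]
  simp only [pv_foldA p0 p1 text.toList 1 0, pv_foldA_rev p0 p1 text.toList 1 0,
    pv_foldB p0 p1 text.toList 0 0 0]
  have hc0 := pvCnt_nonneg p0 text.toList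
  have hc1 := pvCnt_nonneg p1 text.toList
  have hP := pvPairs_nonneg p0 p1 text.toList
  simp only [zero_add, one_mul, zero_mul, add_zero]
  rw [max_def, max_def, max_def]
  split_ifs <;> omega
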